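-- pv_equiv track=rewrite | github.com/ernanhughes/stephanie | stephanie/components/gap/processors/calibration.py | _col_for_diag
-- ===== SOURCE A (Python) =====
-- from typing import Any, Dict, List, Optional
--
-- def _col_for_diag(names: List[str], model: str, key_parts: tuple[str, ...]) -> Optional[int]:
--     """
--     Find diagnostic column like 'tiny.reasoning.attr.ood_hat' or 'tiny.uncertainty'.
--     Matches if all key_parts appear in the column name (in order).
--     """
--     def has_parts(s: str) -> bool:
--         pos = 0
--         for kp in key_parts:
--             j = s.find(kp, pos)
--             if j < 0:
--                 return False
--             pos = j + len(kp)
--         return True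
--
--     for i, n in enumerate(names):
--         if n.startswith(f"{model}.") and has_parts(n):
--             return i
--     return None
-- ===== SOURCE B (Python) =====
-- from typing import List, Optional
--
-- def _col_for_diag(names: List[str], model: str, key_parts: tuple[str, ...]) -> Optional[int]:
--     """Recursive suffix-slicing matcher + next() over a generator (no position counter)."""
--     def matches(s: str, parts: list) -> bool:
--         if not parts:
--             return True
--         kp = parts[0]
--         j = s.find(kp)
--         if j < 0:
--             return False
--         return matches(s[j + len(kp):], parts[1:])
--
--     prefix = model + "."
--     return next((i for i, n in enumerate(names)
--                  if n.startswith(prefix) and matches(n, list(key_parts))), None)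
-- ===== Notes on version B (the rewrite author's own statement) =====
-- stated objective: alternative
-- what changed: Replaces the explicit indexed for-loop and the position-counter find loop by next() over an enumerate generator and a recursive matcher that slices off the consumed suffix after each find; the model prefix string is built once instead of per name.
import Mathlib
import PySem

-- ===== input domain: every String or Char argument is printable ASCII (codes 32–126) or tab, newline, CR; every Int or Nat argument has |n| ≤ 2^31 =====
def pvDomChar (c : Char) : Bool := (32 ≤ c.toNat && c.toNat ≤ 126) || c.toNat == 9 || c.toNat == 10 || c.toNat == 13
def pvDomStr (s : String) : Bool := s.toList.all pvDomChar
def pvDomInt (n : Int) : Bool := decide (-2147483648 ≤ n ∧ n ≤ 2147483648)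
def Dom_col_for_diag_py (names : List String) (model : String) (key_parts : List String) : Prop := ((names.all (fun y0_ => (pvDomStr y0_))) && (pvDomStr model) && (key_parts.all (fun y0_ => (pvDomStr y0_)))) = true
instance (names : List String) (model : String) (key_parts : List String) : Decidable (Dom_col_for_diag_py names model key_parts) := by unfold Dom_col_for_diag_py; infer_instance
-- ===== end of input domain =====

-- B replaces A's indexed for-loop and position-counter find loop by next() over an
-- enumerate generator and a recursive suffix-slicing matcher (alternative decomposition).

-- ===== PORT A =====
-- One step of A's has_parts loop: advance the search position past the found part,
-- 'none' models the early 'return False'.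
def pvStep (s : List Char) (acc : Option Int) (kp : String) : Option Int :=
  match acc with
  | none => none
  | some pos =>
    let j := PySem.Chars.findFrom s kp.toList pos none
    if j < 0 then none else some (j + (kp.toList.length : Int))

def pvHasParts (s : List Char) (key_parts : List String) : Bool :=
  (key_parts.foldl (pvStep s) (some (0 : Int))).isSome

-- A's main loop over enumerate(names), carrying the index i.
def pvColLoop (names : List String) (model : String) (key_parts : List String) (i : Int) : Option Int :=
  match names with
  | [] => none
  | n :: rest =>
    if PySem.Chars.startswith n.toList (model.toList ++ ['.']) && pvHasParts n.toList key_parts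
    then some i
    else pvColLoop rest model key_parts (i + 1)

def col_for_diag_py (names : List String) (model : String) (key_parts : List String) : Option Int :=
  pvColLoop names model key_parts 0

-- ===== PORT B =====
-- B's recursive matcher: find the first part, slice off everything up to and including it, recurse.
def pvMatches (s : List Char) (parts : List String) : Bool :=
  match parts with
  | [] => true
  | kp :: rest =>
    let j := PySem.Chars.find s kp.toList
    if j < 0 then false
    else pvMatches (PySem.Chars.slice s (some (j + (kp.toList.length : Int))) none) rest

-- next((i for i, n in enumerate(names) if …), None)
def col_for_diag_py_alt (names : List String) (model : String) (key_parts : List String) : Option Int :=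
  ((PySem.List.enumerate names 0).find? (fun p =>
      PySem.Chars.startswith p.2.toList (model.toList ++ ['.']) && pvMatches p.2.toList key_parts)).map
    (fun p => p.1)

-- ===== PRECONDITION & SPEC =====
def Spec_col_for_diag_py (names : List String) (model : String) (key_parts : List String) (out : Option Int) : Prop := out = col_for_diag_py_alt names model key_parts
instance (names : List String) (model : String) (key_parts : List String) (out : Option Int) : Decidable (Spec_col_for_diag_py names model key_parts out) := by unfold Spec_col_for_diag_py; infer_instance

-- ===== CLAIM (what is proved, stated in full; the proofs are below) =====
def Claim_equal_col_for_diag_py : Prop := ∀ (names : List String) (model : String) (key_parts : List String), Dom_col_for_diag_py names model key_parts → Spec_col_for_diag_py names model key_parts (col_for_diag_py names model key_parts)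

-- ===== LEMMAS AND PROOFS =====

-- Once A's has_parts fold has failed it stays failed.
lemma pvStep_fold_none (s : List Char) (parts : List String) :
    parts.foldl (pvStep s) none = none := by
  induction parts with
  | nil => rfl
  | cons kp rest ih => simpa [pvStep] using ih

-- Core invariant: A's fold from search position pos equals B's matcher on the suffix s.drop pos.
lemma pvHasParts_eq_matches (parts : List String) (s : List Char) (pos : Nat) (hpos : pos ≤ s.length) :
    (parts.foldl (pvStep s) (some (pos : Int))).isSome = pvMatches (s.drop pos) parts := by
  induction parts generalizing pos with
  | nil => simp [pvMatches]
  | cons kp rest ih =>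
    rw [List.foldl_cons]
    by_cases h : PySem.Chars.find (s.drop pos) kp.toList = -1
    · have hstep : pvStep s (some (pos : Int)) kp = none := by
        simp only [pvStep]
        rw [PySem.Chars.findFrom_natCast s kp.toList pos hpos]
        simp [h]
      rw [hstep, pvStep_fold_none]
      simp [pvMatches, h]
    · have hnn : 0 ≤ PySem.Chars.find (s.drop pos) kp.toList := by
        have := PySem.Chars.neg_one_le_find (s.drop pos) kp.toList
        omega
      set f := PySem.Chars.find (s.drop pos) kp.toList with hf
      have hpre : kp.toList <+: (s.drop pos).drop f.toNat := (PySem.Chars.find_spec hnn).1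
      have hlen : f.toNat + kp.toList.length ≤ s.length - pos := by
        have h1 := hpre.length_le
        have h2 : f ≤ (s.drop pos).length := PySem.Chars.find_le_length _ _
        simp [List.length_drop, String.length_toList] at h1 h2
        simp only [String.length_toList]
        omega
      have hstep : pvStep s (some (pos : Int)) kp
          = some (((pos + f.toNat + kp.toList.length : Nat) : Int)) := by
        simp only [pvStep]
        rw [PySem.Chars.findFrom_natCast s kp.toList pos hpos]
        rw [← hf, if_neg h, if_neg (by omega : ¬ ((pos : Int) + f < 0))]
        congr 1
        omega
      rw [hstep, ih (pos + f.toNat + kp.toList.length) (by omega)]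
      rw [pvMatches]
      simp only [← hf]
      rw [if_neg (by omega : ¬ f < 0)]
      rw [PySem.Chars.slice_eq_listSlice,
        PySem.List.slice_from _ (by simp only [String.length_toList] at hlen ⊢; omega : (0:Int) ≤ f + (kp.toList.length : Int)),
        List.drop_drop]
      congr 2
      simp only [String.length_toList] at hlen ⊢
      omega

lemma pvHasParts_eq (s : List Char) (parts : List String) :
    pvHasParts s parts = pvMatches s parts := by
  have := pvHasParts_eq_matches parts s 0 (Nat.zero_le _)
  simpa [pvHasParts] using this

-- A's indexed loop is find? over enumerate, for every start index.
lemma pvColLoop_eq_find? (model : String) (key_parts : List String) (names : List String) (i : Int) :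
    pvColLoop names model key_parts i
      = ((PySem.List.enumerate names i).find? (fun p =>
          PySem.Chars.startswith p.2.toList (model.toList ++ ['.']) && pvMatches p.2.toList key_parts)).map
        (fun p => p.1) := by
  induction names generalizing i with
  | nil => simp [pvColLoop, PySem.List.enumerate]
  | cons n rest ih =>
    rw [pvColLoop, PySem.List.enumerate_cons, List.find?_cons]
    by_cases hc : (PySem.Chars.startswith n.toList (model.toList ++ ['.']) && pvMatches n.toList key_parts) = true
    · simp [pvHasParts_eq, hc]
    · simp only [pvHasParts_eq]
      simp [hc, ih]

-- ===== VERDICT (by name: the statement is the Claim_ definition above) =====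
theorem col_for_diag_py_spec : Claim_equal_col_for_diag_py := by
  intro names model key_parts _
  show col_for_diag_py names model key_parts = col_for_diag_py_alt names model key_parts
  rw [col_for_diag_py, col_for_diag_py_alt, pvColLoop_eq_find?]
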